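-- pv_equiv track=rewrite | github.com/cmbitton/forkgrade | app/models/restaurant.py | _title_word
-- ===== SOURCE A (Python) =====
-- _UPPER_ACRONYMS = frozenset([
--     'BBQ', 'BB', 'BJ', 'CVS', 'DQ', 'IHOP', 'KFC', 'MCO',
--     'TCBY', 'USA', 'YH',
--     'II', 'III', 'IV', 'VI', 'VII', 'VIII', 'IX',
-- ])
--
-- def _title_word(word: str) -> str:
--     """Title-case one word without capitalizing after an apostrophe.
--
--     Digits don't trigger capitalization of the following letter (so "7th"
--     stays "7th", not "7Th"). Whitelisted short acronyms are preserved as-is.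
--     """
--     # Preserve known short acronyms when the source sends them all-caps.
--     if word.upper() in _UPPER_ACRONYMS:
--         return word.upper()
--     result = []
--     cap_next = True
--     for ch in word:
--         if ch == "'":
--             result.append(ch)
--             cap_next = False
--         elif ch.isalpha():
--             result.append(ch.upper() if cap_next else ch.lower())
--             cap_next = False
--         elif ch.isdigit():
--             # Digits inside a word (e.g. "7th", "B100") are not word
--             # boundaries — don't capitalize the letter that follows.
--             result.append(ch)
--             cap_next = False
--         else:
--             result.append(ch)
--             cap_next = True  # capitalize after hyphens, periods, etc.
--     return ''.join(result)
-- ===== SOURCE B (Python) =====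
-- # B: acronym guard kept; then a stateless zip-with-previous comprehension over the
-- # lowercased word instead of A's accumulator-threaded scan (objective: alternative).
-- _UPPER_ACRONYMS = frozenset([
--     'BBQ', 'BB', 'BJ', 'CVS', 'DQ', 'IHOP', 'KFC', 'MCO',
--     'TCBY', 'USA', 'YH',
--     'II', 'III', 'IV', 'VI', 'VII', 'VIII', 'IX',
-- ])
--
--
-- def _separates(p):
--     """A word boundary lies after p unless p is a letter, digit or apostrophe."""
--     return not (p.isalpha() or p.isdigit() or p == "'")
--
--
-- def _title_word(word: str) -> str:
--     up = word.upper()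
--     if up in _UPPER_ACRONYMS:
--         return up
--     prevs = [None] + list(word[:-1])
--     return ''.join(
--         ch.upper() if ch.isalpha() and (p is None or _separates(p)) else ch
--         for p, ch in zip(prevs, word.lower())
--     )
-- ===== Notes on version B (the rewrite author's own statement) =====
-- stated objective: alternative
-- what changed: Replaces A's single stateful scan threading a cap_next flag through an accumulator with a stateless zip-with-previous comprehension over the lowercased word: each position is capitalized purely from its own character and the original previous character.
import Mathlib
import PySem

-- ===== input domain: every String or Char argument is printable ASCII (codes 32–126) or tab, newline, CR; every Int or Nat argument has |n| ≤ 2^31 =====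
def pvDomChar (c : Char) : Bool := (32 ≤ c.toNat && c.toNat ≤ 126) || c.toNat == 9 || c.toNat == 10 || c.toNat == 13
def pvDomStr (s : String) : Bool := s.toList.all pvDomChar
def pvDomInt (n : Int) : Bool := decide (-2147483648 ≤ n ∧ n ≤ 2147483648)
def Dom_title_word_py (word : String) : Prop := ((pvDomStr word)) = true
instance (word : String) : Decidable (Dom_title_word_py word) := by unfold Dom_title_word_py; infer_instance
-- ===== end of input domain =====

-- B changes the decomposition (stateless zip-with-previous over the lowercased word
-- instead of A's flag-threading scan); same O(n) cost, equivalence proved on all inputs.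

-- ===== PORT A =====
-- the module-level _UPPER_ACRONYMS frozenset (shared by both Pythons)
def pvAcronyms : PySem.Set String := PySem.Set.ofList
  ["BBQ", "BB", "BJ", "CVS", "DQ", "IHOP", "KFC", "MCO",
   "TCBY", "USA", "YH",
   "II", "III", "IV", "VI", "VII", "VIII", "IX"]

-- one step of A's loop body: append to result, set cap_next
def pvStepFold (st : List Char × Bool) (ch : Char) : List Char × Bool :=
  if ch == '\'' then (st.1 ++ [ch], false)
  else if PySem.Chars.isalpha ch then
    (st.1 ++ [if st.2 then PySem.Chars.upperChar ch else PySem.Chars.lowerChar ch], false)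
  else if PySem.Chars.isdigit ch then (st.1 ++ [ch], false)
  else (st.1 ++ [ch], true)

def title_word_py (word : String) : String :=
  if PySem.Set.contains pvAcronyms (PySem.Str.upper word) then PySem.Str.upper word
  else
    -- result : list of chars (Python: list of 1-char strings), cap_next : Bool
    let st := word.toList.foldl pvStepFold ([], true)
    String.ofList st.1   -- ''.join(result): concatenation of the single chars, exact

-- ===== PORT B =====
-- _separates(p): no letter/digit/apostrophe before this position ⇒ word boundary
def pvSeparates (p : Char) : Bool :=
  !(PySem.Chars.isalpha p || PySem.Chars.isdigit p || p == '\'')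

def title_word_py_alt (word : String) : String :=
  if PySem.Set.contains pvAcronyms (PySem.Str.upper word) then PySem.Str.upper word
  else
    -- prevs = [None] + list(word[:-1])
    let prevs : List (Option Char) :=
      none :: (PySem.List.slice word.toList none (some (-1))).map some
    String.ofList ((prevs.zip (PySem.Chars.lower word.toList)).map (fun pc =>
      if PySem.Chars.isalpha pc.2 &&
          (match pc.1 with | none => true | some p => pvSeparates p) then
        PySem.Chars.upperChar pc.2
      else pc.2))

-- ===== PRECONDITION & SPEC =====
def Spec_title_word_py (word : String) (out : String) : Prop := out = title_word_py_alt word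
instance (word : String) (out : String) : Decidable (Spec_title_word_py word out) := by unfold Spec_title_word_py; infer_instance

-- ===== CLAIM (what is proved, stated in full; the proofs are below) =====
def Claim_equal_title_word_py : Prop := ∀ (word : String), Dom_title_word_py word → Spec_title_word_py word (title_word_py word)

-- ===== LEMMAS AND PROOFS =====

-- character-level facts about PySem's ASCII case maps
theorem pvIsupper_iff (c : Char) : PySem.Chars.isupper c = true ↔ (65 ≤ c.toNat ∧ c.toNat ≤ 90) := by
  simp only [PySem.Chars.isupper, Bool.and_eq_true, decide_eq_true_eq, Char.le_def,
    UInt32.le_iff_toNat_le]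
  exact Iff.rfl

theorem pvIslower_iff (c : Char) : PySem.Chars.islower c = true ↔ (97 ≤ c.toNat ∧ c.toNat ≤ 122) := by
  simp only [PySem.Chars.islower, Bool.and_eq_true, decide_eq_true_eq, Char.le_def,
    UInt32.le_iff_toNat_le]
  exact Iff.rfl

theorem pvToNat_ofNat (n : Nat) (h : n < 55296) : (Char.ofNat n).toNat = n := by
  have hv : n.isValidChar := Or.inl h
  simp [Char.ofNat, hv]

theorem pvLowerChar_toNat (c : Char) (h : PySem.Chars.isupper c = true) :
    (PySem.Chars.lowerChar c).toNat = c.toNat + 32 := by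
  have hb := (pvIsupper_iff c).mp h
  simp [PySem.Chars.lowerChar, h, pvToNat_ofNat (c.toNat + 32) (by omega)]

theorem pvIsalpha_lowerChar (c : Char) :
    PySem.Chars.isalpha (PySem.Chars.lowerChar c) = PySem.Chars.isalpha c := by
  by_cases h : PySem.Chars.isupper c = true
  · have hb := (pvIsupper_iff c).mp h
    have ht := pvLowerChar_toNat c h
    simp only [PySem.Chars.isalpha]
    rw [Bool.eq_iff_iff]
    simp only [Bool.or_eq_true, pvIsupper_iff, pvIslower_iff, ht]
    omega
  · simp [PySem.Chars.lowerChar, h]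

theorem pvUpperChar_lowerChar (c : Char) :
    PySem.Chars.upperChar (PySem.Chars.lowerChar c) = PySem.Chars.upperChar c := by
  by_cases h : PySem.Chars.isupper c = true
  · have hb := (pvIsupper_iff c).mp h
    have ht := pvLowerChar_toNat c h
    have hlo : PySem.Chars.islower (PySem.Chars.lowerChar c) = true := by
      rw [pvIslower_iff]; omega
    have hnlo : PySem.Chars.islower c = false := by
      rw [Bool.eq_false_iff, Ne, pvIslower_iff]; omega
    simp only [PySem.Chars.upperChar, hlo, hnlo, if_true, ht]
    apply Char.ext
    apply UInt32.toNat_inj.mp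
    show (Char.ofNat (c.toNat + 32 - 32)).toNat = c.toNat
    rw [pvToNat_ofNat _ (by omega)]
    omega
  · simp [PySem.Chars.lowerChar, h]

theorem pvLowerChar_of_not_alpha (c : Char) (h : PySem.Chars.isalpha c = false) :
    PySem.Chars.lowerChar c = c := by
  simp only [PySem.Chars.isalpha, Bool.or_eq_false_iff] at h
  simp [PySem.Chars.lowerChar, h.1]

-- the common abstract scan both ports compute
def pvStepA (b : Bool) (c : Char) : Char :=
  if c == '\'' then c
  else if PySem.Chars.isalpha c then
    (if b then PySem.Chars.upperChar c else PySem.Chars.lowerChar c)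
  else c

def pvSep (c : Char) : Bool :=
  !(c == '\'' || PySem.Chars.isalpha c || PySem.Chars.isdigit c)

def pvProc (b : Bool) : List Char → List Char
  | [] => []
  | c :: cs => pvStepA b c :: pvProc (pvSep c) cs

theorem pvSeparates_eq_sep (c : Char) : pvSeparates c = pvSep c := by
  simp only [pvSeparates, pvSep]
  cases h1 : (c == '\'') <;> cases h2 : PySem.Chars.isalpha c <;>
    cases h3 : PySem.Chars.isdigit c <;> rfl

-- one loop step, abstractly: append pvStepA, flag becomes pvSep
theorem pvStepFold_eq (st : List Char × Bool) (ch : Char) :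
    pvStepFold st ch = (st.1 ++ [pvStepA st.2 ch], pvSep ch) := by
  unfold pvStepFold pvStepA pvSep
  by_cases h1 : (ch == '\'') = true
  · simp [h1]
  · by_cases h2 : PySem.Chars.isalpha ch = true
    · simp [h1, h2]
    · by_cases h3 : PySem.Chars.isdigit ch = true
      · simp [h1, h2, h3]
      · simp [h1, h2, h3]

-- A's fold computes pvProc
theorem pvFoldA (cs : List Char) : ∀ (acc : List Char) (b : Bool),
    (cs.foldl pvStepFold (acc, b)).1 = acc ++ pvProc b cs := by
  induction cs with
  | nil => intro acc b; simp [pvProc]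
  | cons c cs ih =>
    intro acc b
    rw [List.foldl_cons, pvStepFold_eq, ih, pvProc]
    simp

-- word[:-1] is dropLast
theorem pvClamp_neg_one (n : Nat) : PySem.List.clampIdx n (-1) = n - 1 := by
  simp only [PySem.List.clampIdx]
  split_ifs <;> omega

theorem pvSlice_dropLast (w : List Char) :
    PySem.List.slice w none (some (-1)) = w.dropLast := by
  have h := pvClamp_neg_one w.length
  simp only [PySem.List.slice, h, List.dropLast_eq_take]
  simp


-- the per-position step of B equals A's step, read off the previous character
theorem pvStep_eq (c : Char) (b : Bool) :
    (if PySem.Chars.isalpha (PySem.Chars.lowerChar c) && b then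
      PySem.Chars.upperChar (PySem.Chars.lowerChar c)
    else PySem.Chars.lowerChar c) = pvStepA b c := by
  rw [pvIsalpha_lowerChar]
  by_cases h2 : PySem.Chars.isalpha c = true
  · have h1 : (c == '\'') = false := by
      rw [Bool.eq_false_iff]
      intro hc
      rw [beq_iff_eq] at hc
      subst hc
      simp [PySem.Chars.isalpha, pvIsupper_iff, pvIslower_iff] at h2
    cases b <;> simp [pvStepA, h1, h2, pvUpperChar_lowerChar]
  · rw [Bool.not_eq_true] at h2
    simp [pvStepA, h2, pvLowerChar_of_not_alpha c h2]

-- B's zip computes pvProc, with the flag read off the previous character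
theorem pvZipB (cs : List Char) : ∀ (p : Option Char),
    ((p :: cs.dropLast.map some).zip (cs.map PySem.Chars.lowerChar)).map (fun pc =>
      if PySem.Chars.isalpha pc.2 &&
          (match pc.1 with | none => true | some q => pvSeparates q) then
        PySem.Chars.upperChar pc.2
      else pc.2)
    = pvProc (match p with | none => true | some q => pvSep q) cs := by
  induction cs with
  | nil => intro p; simp [pvProc]
  | cons c cs ih =>
    intro p
    have hstep : (if PySem.Chars.isalpha (PySem.Chars.lowerChar c) &&
          (match p with | none => true | some q => pvSeparates q) then
        PySem.Chars.upperChar (PySem.Chars.lowerChar c)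
      else PySem.Chars.lowerChar c)
        = pvStepA (match p with | none => true | some q => pvSep q) c := by
      cases p with
      | none => exact pvStep_eq c true
      | some q =>
        rw [show (match (some q : Option Char) with | none => true | some q => pvSeparates q)
              = pvSeparates q from rfl,
          show (match (some q : Option Char) with | none => true | some q => pvSep q)
              = pvSep q from rfl,
          pvSeparates_eq_sep]
        exact pvStep_eq c (pvSep q)
    rcases cs with _ | ⟨c', cs'⟩
    · rw [show ([c] : List Char).dropLast = [] from rfl]
      simp only [List.map_nil, List.map_cons, List.zip_cons_cons, List.zip_nil_right,
        List.map_cons, List.map_nil, pvProc]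
      exact congrArg (fun x => [x]) hstep
    · rw [show (c :: c' :: cs').dropLast = c :: (c' :: cs').dropLast from rfl]
      have hih := ih (some c)
      simp only [List.map_cons, List.zip_cons_cons] at hih ⊢
      rw [pvProc, hstep, hih]

-- ===== VERDICT (by name: the statement is the Claim_ definition above) =====
theorem title_word_py_spec : Claim_equal_title_word_py := by
  unfold Claim_equal_title_word_py
  intro word _
  unfold Spec_title_word_py title_word_py title_word_py_alt
  by_cases h : PySem.Set.contains pvAcronyms (PySem.Str.upper word) = true
  · rw [if_pos h, if_pos h]
  · rw [if_neg h, if_neg h]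
    show String.ofList (List.foldl pvStepFold ([], true) word.toList).1
        = String.ofList (((none :: (PySem.List.slice word.toList none (some (-1))).map some).zip
            (PySem.Chars.lower word.toList)).map (fun pc =>
          if PySem.Chars.isalpha pc.2 &&
              (match pc.1 with | none => true | some p => pvSeparates p) then
            PySem.Chars.upperChar pc.2
          else pc.2))
    rw [pvFoldA word.toList [] true, pvSlice_dropLast,
      show PySem.Chars.lower word.toList = word.toList.map PySem.Chars.lowerChar from rfl,
      pvZipB word.toList none]
    rfl
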